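-- pv_equiv track=rewrite | github.com/LokiGadd/Python | 25.py | solve
-- ===== SOURCE A (Python) =====
-- def solve(st):
--     stack = [i for i in st]
--     ans = ""
--     for i in stack[::-1]:
--         if i != "(" and i != ")":
--             if i in "123456789":
--                 ans = ans*int(i)
--             else:
--                 ans = ans + i
--
--     return ans[::-1]
-- ===== SOURCE B (Python) =====
-- def solve(st):
--     # Single forward pass with a stack of char-list buffers; no reversals.
--     parts = [[]]
--     mults = []
--     for c in st:
--         if c == '(' or c == ')':
--             continue
--         if c in "123456789":
--             mults.append(int(c))
--             parts.append([])
--         else: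
--             parts[-1].append(c)
--     while mults:
--         m = mults.pop()
--         seg = parts.pop()
--         parts[-1].extend(seg * m)
--     return ''.join(parts[0])
-- ===== Notes on version B (the rewrite author's own statement) =====
-- stated objective: alternative
-- what changed: Replaces A's reversed traversal with double string reversal by a single forward pass maintaining a stack of segment buffers and multipliers that is collapsed inner-to-outer at the end.
import Mathlib
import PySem

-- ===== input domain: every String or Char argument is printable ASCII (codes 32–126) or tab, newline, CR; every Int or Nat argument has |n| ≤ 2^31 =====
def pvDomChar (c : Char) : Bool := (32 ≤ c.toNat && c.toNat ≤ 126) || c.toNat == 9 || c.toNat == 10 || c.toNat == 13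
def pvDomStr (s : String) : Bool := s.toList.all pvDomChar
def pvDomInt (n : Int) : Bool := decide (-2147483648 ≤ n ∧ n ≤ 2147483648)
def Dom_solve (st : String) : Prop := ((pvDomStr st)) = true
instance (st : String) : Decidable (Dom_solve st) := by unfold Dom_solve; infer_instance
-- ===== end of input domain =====

-- B replaces A's reversed traversal + double string reversal by a single forward pass over a
-- stack of segment buffers collapsed inner-to-outer at the end (objective: alternative algorithm).

-- ===== PORT A =====
-- A: iterate over the reversed character list; digits 1-9 repeat the accumulator, other
-- non-paren chars are appended; finally the accumulator is reversed. Exact transliteration.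
def solve (st : String) : String :=
  let stack := st.toList
  let ans : List Char :=
    stack.reverse.foldl (fun ans i =>
      if i ≠ '(' ∧ i ≠ ')' then
        if i ∈ "123456789".toList then PySem.List.pyRepeat ans ((i.toNat : Int) - 48)
        else ans ++ [i]
      else ans) []
  String.ofList ans.reverse

-- ===== PORT B =====
-- one loop step of Source B's forward pass; stack tops are at the HEAD of each list
def solveAltStep (s : List (List Char) × List Int) (c : Char) : List (List Char) × List Int :=
  if c = '(' ∨ c = ')' then s
  else if c ∈ "123456789".toList then ([] :: s.1, ((c.toNat : Int) - 48) :: s.2)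
  else (match s.1 with | p :: ps => (p ++ [c]) :: ps | [] => [[c]], s.2)

-- Source B's 'while mults:' collapse loop (pop a multiplier and the top segment, fold it into the next)
def solveAltCollapse : List Int → List (List Char) → List Char
  | [], parts => parts.headD []
  | m :: ms, p :: q :: ps => solveAltCollapse ms ((q ++ PySem.List.pyRepeat p m) :: ps)
  | _ :: _, parts => parts.headD []   -- unreachable: parts always keeps one more element than mults

def solve_alt (st : String) : String :=
  let s := st.toList.foldl solveAltStep ([[]], [])
  String.ofList (solveAltCollapse s.2 s.1)

-- ===== PRECONDITION & SPEC =====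
def Spec_solve (st : String) (out : String) : Prop := out = solve_alt st
instance (st : String) (out : String) : Decidable (Spec_solve st out) := by unfold Spec_solve; infer_instance

-- ===== CLAIM =====
def Claim_equal_solve : Prop := ∀ (st : String), Dom_solve st → Spec_solve st (solve st)

-- ===== LEMMAS AND PROOFS =====
-- reference recursion: both programs compute refF of the character list
def refF : List Char → List Char
  | [] => []
  | c :: r =>
    if c = '(' ∨ c = ')' then refF r
    else if c ∈ "123456789".toList then PySem.List.pyRepeat (refF r) ((c.toNat : Int) - 48)
    else c :: refF r

lemma flatten_replicate_comm {α : Type} (k : Nat) (y : List α) :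
    (List.replicate k y).flatten ++ y = y ++ (List.replicate k y).flatten := by
  induction k with
  | zero => simp
  | succ k ih => simp [List.replicate_succ, List.append_assoc, ih]

lemma pyRepeat_reverse {α : Type} (xs : List α) (n : Int) :
    (PySem.List.pyRepeat xs n).reverse = PySem.List.pyRepeat xs.reverse n := by
  unfold PySem.List.pyRepeat
  induction n.toNat with
  | zero => simp
  | succ k ih =>
      simp only [List.replicate_succ, List.flatten_cons, List.reverse_append, ih]
      exact flatten_replicate_comm k xs.reverse

lemma solveA_eq_refF (l : List Char) :
    (l.reverse.foldl (fun ans i =>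
      if i ≠ '(' ∧ i ≠ ')' then
        if i ∈ "123456789".toList then PySem.List.pyRepeat ans ((i.toNat : Int) - 48)
        else ans ++ [i]
      else ans) []).reverse = refF l := by
  rw [List.foldl_reverse]
  induction l with
  | nil => simp [refF]
  | cons c r ih =>
      simp only [List.foldr_cons, refF]
      by_cases hp : c = '(' ∨ c = ')'
      · have hn : ¬ (c ≠ '(' ∧ c ≠ ')') := by tauto
        rw [if_neg hn, if_pos hp, ih]
      · have hne : c ≠ '(' ∧ c ≠ ')' := by tauto
        rw [if_pos hne, if_neg hp]
        by_cases hd : c ∈ "123456789".toList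
        · rw [if_pos hd, if_pos hd, pyRepeat_reverse, ih]
        · rw [if_neg hd, if_neg hd]
          simp only [List.reverse_append, List.reverse_cons, List.reverse_nil,
            List.nil_append, List.singleton_append, ih]

lemma solveB_pass (l : List Char) :
    ∀ (p : List Char) (ps : List (List Char)) (ms : List Int),
      solveAltCollapse (l.foldl solveAltStep (p :: ps, ms)).2
          (l.foldl solveAltStep (p :: ps, ms)).1
        = solveAltCollapse ms ((p ++ refF l) :: ps) := by
  induction l with
  | nil => intro p ps ms; simp [refF]
  | cons c r ih =>
      intro p ps ms
      simp only [List.foldl_cons]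
      by_cases hp : c = '(' ∨ c = ')'
      · simp only [solveAltStep, if_pos hp]
        rw [ih p ps ms]
        simp only [refF, if_pos hp]
      · by_cases hd : c ∈ "123456789".toList
        · simp only [solveAltStep, if_neg hp, if_pos hd]
          rw [ih [] (p :: ps) (((c.toNat : Int) - 48) :: ms)]
          simp only [List.nil_append, solveAltCollapse, refF, if_neg hp, if_pos hd]
        · simp only [solveAltStep, if_neg hp, if_neg hd]
          rw [ih (p ++ [c]) ps ms]
          simp only [refF, if_neg hp, if_neg hd, List.append_assoc, List.singleton_append]

-- ===== VERDICT =====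
theorem solve_spec : Claim_equal_solve := by
  intro st _
  unfold Spec_solve solve solve_alt
  simp only [solveA_eq_refF, solveB_pass st.toList [] [] [], solveAltCollapse,
    List.nil_append, List.headD_cons]
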